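-- pv_equiv track=rewrite | github.com/junhong-liao/algorithms | platform-prep/week2/count_rotations_optimized.py | count_rotations_optimized
-- ===== SOURCE A (Python) =====
-- def generate_rotations(num):
--     s = str(num)
--     return {s[i:] + s[:i] for i in range(len(s))}
--
-- def count_rotations_optimized(arr: list[int]) -> int:
--     rotations = {}
--     for num in arr:
--         for r in generate_rotations(num):
--             rotations[r] = rotations.get(r, 0) + 1
--     count = 0
--     for num in arr:
--         # subtract one, because we don't want to count the number itself.
--         count += rotations.get(str(num), 0) - 1
--     return count
-- ===== SOURCE B (Python) =====
-- def _rotations(num):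
--     s = str(num)
--     return {s[k:] + s[:k] for k in range(len(s))}
--
-- def count_rotations_optimized(arr: list[int]) -> int:
--     value_count = {}
--     for num in arr:
--         s = str(num)
--         value_count[s] = value_count.get(s, 0) + 1
--     total = 0
--     for num in arr:
--         for r in _rotations(num):
--             total += value_count.get(r, 0)
--     return total - len(arr)
-- ===== Notes on version B (the rewrite author's own statement) =====
-- stated objective: alternative
-- what changed: B transposes the summation: it builds a frequency dict keyed by the value strings only (one dict write per element instead of one per rotation), then for each number sums the frequencies of that number's rotations and subtracts len(arr) for the self-matches, instead of A's dict counting every rotation of every number and one flat lookup per value.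
import Mathlib
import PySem

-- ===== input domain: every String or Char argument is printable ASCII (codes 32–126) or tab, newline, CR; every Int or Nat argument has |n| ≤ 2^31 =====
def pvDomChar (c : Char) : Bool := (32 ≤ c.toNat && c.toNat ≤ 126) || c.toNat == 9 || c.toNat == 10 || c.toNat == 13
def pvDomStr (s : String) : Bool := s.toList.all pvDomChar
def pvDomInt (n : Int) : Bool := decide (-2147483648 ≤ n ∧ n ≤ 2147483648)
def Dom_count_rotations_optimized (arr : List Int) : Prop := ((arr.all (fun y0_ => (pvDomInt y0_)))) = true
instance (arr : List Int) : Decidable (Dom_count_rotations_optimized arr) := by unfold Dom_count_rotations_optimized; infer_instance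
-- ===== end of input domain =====

-- B transposes the summation: a frequency dict of value strings is built once and, per number,
-- the frequencies of its rotations are summed, with len(arr) subtracted for self-matches ("alternative").

-- ===== PORT A =====
-- helper generate_rotations: {s[i:] + s[:i] for i in range(len(s))} with s = str(num), on List Char
def generate_rotations (num : Int) : PySem.Set (List Char) :=
  let s := PySem.Int.toChars num
  PySem.Set.ofList ((PySem.List.pyRange 0 (s.length : Int) 1).map
    (fun i => PySem.List.slice s (some i) none ++ PySem.List.slice s none (some i)))

def count_rotations_optimized (arr : List Int) : Int :=
  let rotations : PySem.Dict (List Char) Int := arr.foldl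
    (fun d num => (generate_rotations num).foldl (fun d r => d.modify r 0 (· + 1)) d)
    PySem.Dict.empty
  arr.foldl (fun count num => count + (rotations.getD (PySem.Int.toChars num) 0 - 1)) 0

-- ===== PORT B =====
def count_rotations_optimized_alt (arr : List Int) : Int :=
  let valueCount : PySem.Dict (List Char) Int := arr.foldl
    (fun d num => d.modify (PySem.Int.toChars num) 0 (· + 1)) PySem.Dict.empty
  let total : Int := arr.foldl
    (fun total num => (generate_rotations num).foldl (fun t r => t + valueCount.getD r 0) total) 0
  total - arr.length

-- ===== PRECONDITION & SPEC =====
def Spec_count_rotations_optimized (arr : List Int) (out : Int) : Prop := out = count_rotations_optimized_alt arr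
instance (arr : List Int) (out : Int) : Decidable (Spec_count_rotations_optimized arr out) := by unfold Spec_count_rotations_optimized; infer_instance

-- ===== CLAIM (what is proved, stated in full; the proofs are below) =====
def Claim_equal_count_rotations_optimized : Prop := ∀ (arr : List Int), Dom_count_rotations_optimized arr → Spec_count_rotations_optimized arr (count_rotations_optimized arr)

-- ===== LEMMAS AND PROOFS =====

-- membership in generate_rotations is "being a rotation"
theorem mem_generate_rotations (num : Int) (v : List Char) :
    v ∈ generate_rotations num ↔
      ∃ k : Nat, k < (PySem.Int.toChars num).length ∧
        v = (PySem.Int.toChars num).drop k ++ (PySem.Int.toChars num).take k := by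
  unfold generate_rotations
  simp only [PySem.Set.mem_ofList, List.mem_map]
  constructor
  · rintro ⟨i, hi, rfl⟩
    rw [PySem.List.mem_pyRange_one] at hi
    refine ⟨i.toNat, by omega, ?_⟩
    rw [PySem.List.slice_from _ hi.1, PySem.List.slice_to _ hi.1]
  · rintro ⟨k, hk, rfl⟩
    refine ⟨(k : Int), ?_, ?_⟩
    · rw [PySem.List.mem_pyRange_one]; omega
    · rw [PySem.List.slice_from_natCast, PySem.List.slice_to_natCast]

theorem nodup_generate_rotations (num : Int) : (generate_rotations num).Nodup := by
  unfold generate_rotations; exact PySem.Set.nodup_ofList _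

-- rotation is a symmetric relation
theorem rot_symm (s t : List Char)
    (h : ∃ k : Nat, k < s.length ∧ t = s.drop k ++ s.take k) :
    ∃ j : Nat, j < t.length ∧ s = t.drop j ++ t.take j := by
  obtain ⟨k, hk, rfl⟩ := h
  by_cases h0 : k = 0
  · subst h0
    refine ⟨0, ?_, by simp⟩
    simpa using hk
  · refine ⟨s.length - k, ?_, ?_⟩
    · simp only [List.length_append, List.length_drop, List.length_take]
      omega
    · have hd : s.length - k = (s.drop k).length := by simp
      rw [hd, List.drop_left, List.take_left, List.take_append_drop]

theorem mem_rot_symm (n m : Int) :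
    PySem.Int.toChars n ∈ generate_rotations m ↔ PySem.Int.toChars m ∈ generate_rotations n := by
  rw [mem_generate_rotations, mem_generate_rotations]
  exact ⟨rot_symm _ _, rot_symm _ _⟩

-- if x == r indicator summed over a Nodup list
theorem sum_indicator_nodup (S : List (List Char)) (x : List Char) (h : S.Nodup) :
    (S.map (fun r => if x = r then (1 : Int) else 0)).sum = if x ∈ S then 1 else 0 := by
  induction S with
  | nil => simp
  | cons a S ih =>
    simp only [List.nodup_cons] at h
    simp only [List.map_cons, List.sum_cons, ih h.2, List.mem_cons]
    by_cases hxa : x = a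
    · subst hxa
      simp [h.1]
    · simp [hxa]

-- summing counts over a Nodup list of keys is counting membership
theorem sum_count_eq_countP (S L : List (List Char)) (h : S.Nodup) :
    (S.map (fun r => (L.count r : Int))).sum = (L.countP (fun x => decide (x ∈ S)) : Int) := by
  induction L with
  | nil => simp
  | cons x L ih =>
    simp only [List.count_cons, List.countP_cons]
    push_cast
    rw [← ih]
    rw [show (S.map (fun r => ((L.count r : Int) + if x == r then 1 else 0))).sum
        = (S.map (fun r => (L.count r : Int))).sum
          + (S.map (fun r => if x = r then (1 : Int) else 0)).sum by
      rw [← List.sum_map_add]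
      congr 1
      apply List.map_congr_left
      intro r _
      by_cases hxr : x = r <;> simp [hxr]]
    rw [sum_indicator_nodup S x h]
    by_cases hm : x ∈ S <;> simp [hm]

-- A's rotations dict counts, per key v, the arr elements having v among their rotations
theorem rotations_dict_getD (arr : List Int) (v : List Char) :
    ((arr.foldl (fun d num => (generate_rotations num).foldl (fun d r => d.modify r 0 (· + 1)) d)
        PySem.Dict.empty).getD v 0)
      = (arr.countP (fun m => decide (v ∈ generate_rotations m)) : Int) := by
  suffices h : ∀ (d : PySem.Dict (List Char) Int),
      ((arr.foldl (fun d num => (generate_rotations num).foldl (fun d r => d.modify r 0 (· + 1)) d)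
          d).getD v 0)
        = d.getD v 0 + (arr.countP (fun m => decide (v ∈ generate_rotations m)) : Int) by
    rw [h]; simp [PySem.Dict.getD, PySem.Dict.get?, PySem.Dict.empty]
  induction arr with
  | nil => intro d; simp
  | cons num arr ih =>
    intro d
    simp only [List.foldl_cons, List.countP_cons, ih]
    rw [PySem.Dict.getD_foldl_modify_add_one]
    have : ((generate_rotations num).count v : Int) = if v ∈ generate_rotations num then 1 else 0 := by
      by_cases hm : v ∈ generate_rotations num
      · rw [List.count_eq_one_of_mem (nodup_generate_rotations num) hm]; simp [hm]
      · rw [List.count_eq_zero_of_not_mem hm]; simp [hm]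
    rw [this]
    push_cast
    by_cases hm : v ∈ generate_rotations num
    · simp [hm]
      ring
    · simp [hm]

-- B's valueCount dict counts, per key v, the arr elements whose string is v
theorem valueCount_getD (arr : List Int) (v : List Char) :
    ((arr.foldl (fun d num => d.modify (PySem.Int.toChars num) 0 (· + 1))
        PySem.Dict.empty).getD v 0)
      = ((arr.map PySem.Int.toChars).count v : Int) := by
  rw [← List.foldl_map (f := PySem.Int.toChars)
      (g := fun d s => PySem.Dict.modify d s 0 (· + 1))]
  rw [PySem.Dict.getD_foldl_modify_add_one]
  simp [PySem.Dict.getD, PySem.Dict.get?, PySem.Dict.empty]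

-- ===== VERDICT (by name: the statement is the Claim_ definition above) =====
theorem count_rotations_optimized_spec : Claim_equal_count_rotations_optimized := by
  intro arr _
  unfold Spec_count_rotations_optimized count_rotations_optimized count_rotations_optimized_alt
  simp only
  set DA : PySem.Dict (List Char) Int := arr.foldl (fun d num => (generate_rotations num).foldl
      (fun d r => d.modify r 0 (· + 1)) d) PySem.Dict.empty with hDA
  set DB : PySem.Dict (List Char) Int := arr.foldl
      (fun d num => d.modify (PySem.Int.toChars num) 0 (· + 1)) PySem.Dict.empty with hDB
  rw [PySem.List.foldl_add (g := fun num => DA.getD (PySem.Int.toChars num) 0 - 1)]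
  rw [PySem.List.foldl_congr_mem arr
      (fun total num => (generate_rotations num).foldl (fun t r => t + DB.getD r 0) total)
      (fun total num => total + ((generate_rotations num).map (fun r => DB.getD r 0)).sum)
      0 (fun acc x _ => PySem.List.foldl_add _ _ _)]
  rw [PySem.List.foldl_add (g := fun num => ((generate_rotations num).map (fun r => DB.getD r 0)).sum)]
  simp only [zero_add]
  -- pointwise: for each num the two summands agree up to the -1 / -len(arr) bookkeeping
  have key : ∀ n ∈ arr,
      DA.getD (PySem.Int.toChars n) 0 - 1
        = ((generate_rotations n).map (fun r => DB.getD r 0)).sum - 1 := by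
    intro n _
    rw [hDA, rotations_dict_getD]
    have hmapB : ((generate_rotations n).map (fun r => DB.getD r 0)).sum
        = ((generate_rotations n).map (fun r => ((arr.map PySem.Int.toChars).count r : Int))).sum := by
      congr 1
      exact List.map_congr_left (fun r _ => by rw [hDB, valueCount_getD])
    rw [hmapB, sum_count_eq_countP _ _ (nodup_generate_rotations n)]
    congr 2
    rw [List.countP_map]
    apply List.countP_congr
    intro m _
    simp only [Function.comp_apply]
    simp [mem_rot_symm n m]
  rw [List.map_congr_left key]
  rw [show (arr.map (fun n => ((generate_rotations n).map (fun r => DB.getD r 0)).sum - 1))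
      = arr.map (fun n => ((generate_rotations n).map (fun r => DB.getD r 0)).sum + (-1)) from rfl]
  rw [List.sum_map_add]
  simp
  ring
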